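-- pv_equiv track=rewrite | github.com/ishaanxgupta/CodeForces-track | D_Speedbreaker.py | speedbreaker
-- ===== SOURCE A (Python) =====
-- def speedbreaker(test_cases):
--     results = []
--     for case in test_cases:
--         n, a = case
--         # Compute L and R
--         L = 1
--         R = n
--         for i in range(1, n +1):
--             L = max(L, i - a[i-1] +1)
--             R = min(R, i + a[i-1] -1)
--         if L > R:
--             results.append(0)
--             continue
--         # Initialize count array
--         count = {}
--         D_max = 200  # Adjust based on performance
--         for d in range(1, D_max +1):
--             for s in range(d +1, n -d +1):
--                 if a[s -d -1] >=d +1 and a[s +d -1] >=d +1: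
--                     if a[s -d -1] >=d +2 or a[s +d -1] >=d +2:
--                         if L <=s <=R:
--                             if s in count:
--                                 count[s] +=1
--                             else:
--                                 count[s] =1
--         # Now, count valid s
--         valid =0
--         for s in range(L, R +1):
--             d_max_s = min(s -1, n -s)
--             if d_max_s > D_max:
--                 continue  # Assume invalid since d > D_max not checked
--             if count.get(s,0) >=d_max_s:
--                 valid +=1
--         results.append(valid)
--     return results
-- ===== SOURCE B (Python) =====
-- def speedbreaker(test_cases):
--     results = []
--     for n, a in test_cases:
--         L, R = 1, n
--         for i in range(1, n + 1):
--             L = max(L, i - a[i-1] + 1)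
--             R = min(R, i + a[i-1] - 1)
--         if L > R:
--             results.append(0)
--             continue
--         valid = 0
--         for s in range(L, R + 1):
--             d_max_s = min(s - 1, n - s)
--             if d_max_s > 200:
--                 continue
--             if all(a[s-d-1] >= d + 1 and a[s+d-1] >= d + 1
--                    and (a[s-d-1] >= d + 2 or a[s+d-1] >= d + 2)
--                    for d in range(1, d_max_s + 1)):
--                 valid += 1
--         results.append(valid)
--     return results
-- ===== Notes on version B (the rewrite author's own statement) =====
-- stated objective: simpler
-- what changed: B drops A's 200-pass outer d-loop and the count dictionary entirely: for each candidate s in [L,R] it directly checks all d in 1..min(s-1,n-s) with an all() test, instead of building a global per-s counter table and comparing it to d_max_s.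
import Mathlib
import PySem

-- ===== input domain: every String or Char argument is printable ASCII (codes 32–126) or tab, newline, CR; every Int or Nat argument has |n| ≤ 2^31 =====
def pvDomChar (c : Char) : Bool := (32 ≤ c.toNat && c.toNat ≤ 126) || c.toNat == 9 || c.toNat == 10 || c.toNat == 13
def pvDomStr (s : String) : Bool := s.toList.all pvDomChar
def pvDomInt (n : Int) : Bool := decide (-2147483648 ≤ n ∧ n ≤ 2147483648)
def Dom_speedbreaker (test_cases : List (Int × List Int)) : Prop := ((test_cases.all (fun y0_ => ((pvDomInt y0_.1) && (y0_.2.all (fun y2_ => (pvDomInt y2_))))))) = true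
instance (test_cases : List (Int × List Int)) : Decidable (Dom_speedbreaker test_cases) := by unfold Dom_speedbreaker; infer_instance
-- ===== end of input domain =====

-- B drops A's count dict and its outer d-loop: for each candidate s it directly tests all d in 1..min(s-1,n-s)
-- (objective: simpler — same result, one direct per-candidate check instead of a 200-pass counting table).

-- shared by both ports: the L/R precomputation loop, identical lines in Source A and Source B
def pvLR (n : Int) (a : List Int) : Int × Int :=
  (PySem.List.pyRange 1 (n + 1) 1).foldl
    (fun (p : Int × Int) i =>
      (max p.1 (i - PySem.List.pyGetD a (i - 1) 0 + 1),
       min p.2 (i + PySem.List.pyGetD a (i - 1) 0 - 1))) (1, n)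

-- ===== PORT A =====
def speedbreakerCase (n : Int) (a : List Int) : Int :=
  let LR := pvLR n a
  if LR.1 > LR.2 then 0
  else
    let count : PySem.Dict Int Int :=
      (PySem.List.pyRange 1 (200 + 1) 1).foldl (fun c d =>
        (PySem.List.pyRange (d + 1) (n - d + 1) 1).foldl (fun c s =>
          if PySem.List.pyGetD a (s - d - 1) 0 ≥ d + 1 ∧ PySem.List.pyGetD a (s + d - 1) 0 ≥ d + 1 then
            if PySem.List.pyGetD a (s - d - 1) 0 ≥ d + 2 ∨ PySem.List.pyGetD a (s + d - 1) 0 ≥ d + 2 then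
              if LR.1 ≤ s ∧ s ≤ LR.2 then
                if c.contains s then c.insert s (c.getD s 0 + 1) else c.insert s 1
              else c
            else c
          else c) c) PySem.Dict.empty
    (PySem.List.pyRange LR.1 (LR.2 + 1) 1).foldl (fun valid s =>
      let dms := min (s - 1) (n - s)
      if dms > 200 then valid
      else if count.getD s 0 ≥ dms then valid + 1 else valid) 0

def speedbreaker (test_cases : List (Int × List Int)) : List Int :=
  test_cases.foldl (fun results c => results ++ [speedbreakerCase c.1 c.2]) []

-- ===== PORT B =====
def speedbreakerCaseAlt (n : Int) (a : List Int) : Int :=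
  let LR := pvLR n a
  if LR.1 > LR.2 then 0
  else
    (PySem.List.pyRange LR.1 (LR.2 + 1) 1).foldl (fun valid s =>
      let dms := min (s - 1) (n - s)
      if dms > 200 then valid
      else if (PySem.List.pyRange 1 (dms + 1) 1).all (fun d =>
          decide (PySem.List.pyGetD a (s - d - 1) 0 ≥ d + 1) &&
          decide (PySem.List.pyGetD a (s + d - 1) 0 ≥ d + 1) &&
          (decide (PySem.List.pyGetD a (s - d - 1) 0 ≥ d + 2) ||
           decide (PySem.List.pyGetD a (s + d - 1) 0 ≥ d + 2)))
        then valid + 1 else valid) 0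

def speedbreaker_alt (test_cases : List (Int × List Int)) : List Int :=
  test_cases.foldl (fun results c => results ++ [speedbreakerCaseAlt c.1 c.2]) []

-- ===== PRECONDITION & SPEC =====
-- Pre_ excludes exactly the cases with n > len(a), on which the Python A raises IndexError in the L/R loop.
def Pre_speedbreaker (test_cases : List (Int × List Int)) : Prop :=
  ∀ c ∈ test_cases, c.1 ≤ (c.2.length : Int)
instance (test_cases : List (Int × List Int)) : Decidable (Pre_speedbreaker test_cases) := by
  unfold Pre_speedbreaker; infer_instance
def pvWitness_speedbreaker : (List (Int × List Int)) := [(2, [1, 2]), (3, [1, 1, 3])]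

def Spec_speedbreaker (test_cases : List (Int × List Int)) (out : List Int) : Prop := out = speedbreaker_alt test_cases
instance (test_cases : List (Int × List Int)) (out : List Int) : Decidable (Spec_speedbreaker test_cases out) := by unfold Spec_speedbreaker; infer_instance

-- ===== CLAIM (what is proved, stated in full; the proofs are below) =====
def Claim_equal_speedbreaker : Prop := ∀ (test_cases : List (Int × List Int)), Dom_speedbreaker test_cases → Pre_speedbreaker test_cases → Spec_speedbreaker test_cases (speedbreaker test_cases)

-- ===== LEMMAS AND PROOFS =====

def pvCond (a : List Int) (d s : Int) : Bool :=
  (decide (PySem.List.pyGetD a (s - d - 1) 0 ≥ d + 1) &&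
   decide (PySem.List.pyGetD a (s + d - 1) 0 ≥ d + 1)) &&
  (decide (PySem.List.pyGetD a (s - d - 1) 0 ≥ d + 2) ||
   decide (PySem.List.pyGetD a (s + d - 1) 0 ≥ d + 2))

theorem pvLR_split (n : Int) (a : List Int) :
    pvLR n a = ((PySem.List.pyRange 1 (n + 1) 1).foldl
        (fun acc i => max acc (i - PySem.List.pyGetD a (i - 1) 0 + 1)) 1,
      (PySem.List.pyRange 1 (n + 1) 1).foldl
        (fun acc i => min acc (i + PySem.List.pyGetD a (i - 1) 0 - 1)) n) := by
  unfold pvLR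
  rw [PySem.List.foldl_prod_mk (f := fun acc i => max acc (i - PySem.List.pyGetD a (i - 1) 0 + 1))
      (g := fun acc i => min acc (i + PySem.List.pyGetD a (i - 1) 0 - 1))]

theorem foldl_min_le_int {β : Type} (l : List β) (f : β → Int) (init : Int) :
    l.foldl (fun acc y => min acc (f y)) init ≤ init := by
  induction l generalizing init with
  | nil => simp
  | cons x t ih => exact le_trans (ih _) (min_le_left _ _)

theorem pvLR_fst_ge (n : Int) (a : List Int) : 1 ≤ (pvLR n a).1 := by
  rw [pvLR_split]
  exact (PySem.List.le_foldl_max_int _ _ _).1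

theorem pvLR_snd_le (n : Int) (a : List Int) : (pvLR n a).2 ≤ n := by
  rw [pvLR_split]
  exact foldl_min_le_int _ _ _

theorem dict_bump (c : PySem.Dict Int Int) (s : Int) :
    (if c.contains s then c.insert s (c.getD s 0 + 1) else c.insert s 1) =
      c.insert s (c.getD s 0 + 1) := by
  by_cases h : c.contains s = true
  · simp [h]
  · have h' : c.contains s = false := by simpa using h
    rw [PySem.Dict.getD_of_not_contains c 0 h']
    simp [h']

theorem foldl_foldl_flatMap {α β γ : Type} (l : List α) (g : α → List β) (f : γ → β → γ)
    (init : γ) :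
    l.foldl (fun acc d => (g d).foldl f acc) init = (l.flatMap g).foldl f init := by
  induction l generalizing init with
  | nil => simp
  | cons x t ih => simp [List.flatMap_cons, List.foldl_append, ih]

def pvBig (n : Int) (a : List Int) (L R : Int) : List Int :=
  (PySem.List.pyRange 1 (200 + 1) 1).flatMap (fun d =>
    (PySem.List.pyRange (d + 1) (n - d + 1) 1).filter
      (fun s => decide (pvCond a d s = true ∧ L ≤ s ∧ s ≤ R)))

theorem count_flatMap {α : Type} (l : List α) (g : α → List Int) (s : Int) :
    (l.flatMap g).count s = (l.map (fun d => (g d).count s)).sum := by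
  induction l with
  | nil => simp
  | cons x t ih => simp [List.flatMap_cons, List.count_append, ih]

theorem count_filter_pyRange (lo hi : Int) (p : Int → Prop) [DecidablePred p] (s : Int) :
    ((PySem.List.pyRange lo hi 1).filter (fun x => decide (p x))).count s =
      if lo ≤ s ∧ s < hi ∧ p s then 1 else 0 := by
  have hnd : ((PySem.List.pyRange lo hi 1).filter (fun x => decide (p x))).Nodup :=
    (PySem.List.nodup_pyRange_one lo hi).filter _
  have hmem : s ∈ (PySem.List.pyRange lo hi 1).filter (fun x => decide (p x)) ↔
      (lo ≤ s ∧ s < hi ∧ p s) := by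
    simp [List.mem_filter, PySem.List.mem_pyRange_one, and_assoc]
  by_cases h : lo ≤ s ∧ s < hi ∧ p s
  · rw [if_pos h]
    have h1 : 1 ≤ ((PySem.List.pyRange lo hi 1).filter (fun x => decide (p x))).count s :=
      List.one_le_count_iff.2 (hmem.2 h)
    have h2 := (List.nodup_iff_count_le_one.1 hnd) s
    omega
  · rw [if_neg h]
    exact List.count_eq_zero.2 (fun hm => h (hmem.1 hm))

theorem count_dict_getD (n : Int) (a : List Int) (L R : Int) (s : Int) :
    ((PySem.List.pyRange 1 (200 + 1) 1).foldl (fun c d =>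
        (PySem.List.pyRange (d + 1) (n - d + 1) 1).foldl (fun c s =>
          if PySem.List.pyGetD a (s - d - 1) 0 ≥ d + 1 ∧ PySem.List.pyGetD a (s + d - 1) 0 ≥ d + 1 then
            if PySem.List.pyGetD a (s - d - 1) 0 ≥ d + 2 ∨ PySem.List.pyGetD a (s + d - 1) 0 ≥ d + 2 then
              if L ≤ s ∧ s ≤ R then
                if c.contains s then c.insert s (c.getD s 0 + 1) else c.insert s 1
              else c
            else c
          else c) c) PySem.Dict.empty).getD s 0 = ((pvBig n a L R).count s : Int) := by
  have hstep : ∀ (acc : PySem.Dict Int Int), ∀ d ∈ PySem.List.pyRange 1 (200 + 1) 1,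
      (PySem.List.pyRange (d + 1) (n - d + 1) 1).foldl (fun c s =>
          if PySem.List.pyGetD a (s - d - 1) 0 ≥ d + 1 ∧ PySem.List.pyGetD a (s + d - 1) 0 ≥ d + 1 then
            if PySem.List.pyGetD a (s - d - 1) 0 ≥ d + 2 ∨ PySem.List.pyGetD a (s + d - 1) 0 ≥ d + 2 then
              if L ≤ s ∧ s ≤ R then
                if c.contains s then c.insert s (c.getD s 0 + 1) else c.insert s 1
              else c
            else c
          else c) acc =
      ((PySem.List.pyRange (d + 1) (n - d + 1) 1).filter
          (fun s => decide (pvCond a d s = true ∧ L ≤ s ∧ s ≤ R))).foldl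
          (fun (c : PySem.Dict Int Int) s => c.insert s (c.getD s 0 + 1)) acc := by
    intro acc d _
    have hbody : (fun (c : PySem.Dict Int Int) x =>
        if PySem.List.pyGetD a (x - d - 1) 0 ≥ d + 1 ∧ PySem.List.pyGetD a (x + d - 1) 0 ≥ d + 1 then
          if PySem.List.pyGetD a (x - d - 1) 0 ≥ d + 2 ∨ PySem.List.pyGetD a (x + d - 1) 0 ≥ d + 2 then
            if L ≤ x ∧ x ≤ R then
              if c.contains x then c.insert x (c.getD x 0 + 1) else c.insert x 1
            else c
          else c
        else c) =
        (fun (c : PySem.Dict Int Int) x =>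
          if pvCond a d x = true ∧ L ≤ x ∧ x ≤ R then c.insert x (c.getD x 0 + 1) else c) := by
      funext c x
      rw [← dict_bump c x]
      simp only [pvCond, Bool.and_eq_true, Bool.or_eq_true, decide_eq_true_eq]
      split_ifs <;> tauto
    rw [hbody]
    exact PySem.List.foldl_ite_eq_foldl_filter _ _ _ _
  rw [PySem.List.foldl_congr_mem _ _ _ _ hstep, foldl_foldl_flatMap,
    PySem.Dict.getD_foldl_insert_add_one]
  simp [pvBig]

theorem sum_ite01 {α : Type} (l : List α) (p : α → Prop) [DecidablePred p] :
    (l.map (fun x => if p x then (1 : Nat) else 0)).sum = l.countP (fun x => decide (p x)) := by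
  induction l with
  | nil => simp
  | cons x t ih =>
    by_cases h : p x <;> simp [h, ih] <;> omega

theorem key_iff (n : Int) (a : List Int) (L R s : Int)
    (h1 : 1 ≤ L) (hn : R ≤ n) (hL : L ≤ s) (hR : s ≤ R)
    (hdm : min (s - 1) (n - s) ≤ 200) :
    (((pvBig n a L R).count s : Int) ≥ min (s - 1) (n - s)) ↔
      ((PySem.List.pyRange 1 (min (s - 1) (n - s) + 1) 1).all (fun d =>
          decide (PySem.List.pyGetD a (s - d - 1) 0 ≥ d + 1) &&
          decide (PySem.List.pyGetD a (s + d - 1) 0 ≥ d + 1) &&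
          (decide (PySem.List.pyGetD a (s - d - 1) 0 ≥ d + 2) ||
           decide (PySem.List.pyGetD a (s + d - 1) 0 ≥ d + 2))) = true) := by
  set m := min (s - 1) (n - s) with hm
  have hm0 : 0 ≤ m := by omega
  have hcount : (pvBig n a L R).count s =
      (PySem.List.pyRange 1 (200 + 1) 1).countP
        (fun d => decide (d + 1 ≤ s ∧ s < n - d + 1 ∧ (pvCond a d s = true ∧ L ≤ s ∧ s ≤ R))) := by
    rw [pvBig, count_flatMap]
    have hpiece : ∀ d : Int,
        ((PySem.List.pyRange (d + 1) (n - d + 1) 1).filter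
          (fun x => decide (pvCond a d x = true ∧ L ≤ x ∧ x ≤ R))).count s =
        if d + 1 ≤ s ∧ s < n - d + 1 ∧ (pvCond a d s = true ∧ L ≤ s ∧ s ≤ R) then 1 else 0 :=
      fun d => count_filter_pyRange (d + 1) (n - d + 1) _ s
    simp only [hpiece]
    rw [sum_ite01]
  rw [hcount,
    PySem.List.pyRange_one_append 1 (m + 1) (200 + 1) (by omega) (by omega),
    List.countP_append]
  have hzero : (PySem.List.pyRange (m + 1) (200 + 1) 1).countP
      (fun d => decide (d + 1 ≤ s ∧ s < n - d + 1 ∧ (pvCond a d s = true ∧ L ≤ s ∧ s ≤ R))) = 0 := by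
    rw [List.countP_eq_zero]
    intro d hd
    have hdmem := PySem.List.mem_pyRange_one.1 hd
    simp only [decide_eq_true_eq, not_and]
    intro hds hsn
    omega
  rw [hzero, Nat.add_zero]
  have hcongr : (PySem.List.pyRange 1 (m + 1) 1).countP
      (fun d => decide (d + 1 ≤ s ∧ s < n - d + 1 ∧ (pvCond a d s = true ∧ L ≤ s ∧ s ≤ R))) =
      (PySem.List.pyRange 1 (m + 1) 1).countP (fun d => pvCond a d s) := by
    apply List.countP_congr
    intro d hd
    have hdmem := PySem.List.mem_pyRange_one.1 hd
    simp only [decide_eq_true_eq]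
    constructor
    · tauto
    · intro hc
      exact ⟨by omega, by omega, hc, hL, hR⟩
  rw [hcongr]
  have hlen : (PySem.List.pyRange 1 (m + 1) 1).length = m.toNat := by
    rw [PySem.List.length_pyRange_one]
    omega
  have hle : (PySem.List.pyRange 1 (m + 1) 1).countP (fun d => pvCond a d s) ≤ m.toNat := by
    rw [← hlen]; exact List.countP_le_length
  constructor
  · intro h
    have heq : (PySem.List.pyRange 1 (m + 1) 1).countP (fun d => pvCond a d s) =
        (PySem.List.pyRange 1 (m + 1) 1).length := by omega
    have hall := List.countP_eq_length.1 heq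
    rw [List.all_eq_true]
    intro d hd
    have hc := hall d hd
    simp only [pvCond, Bool.and_eq_true, Bool.or_eq_true] at hc ⊢
    tauto
  · intro h
    rw [List.all_eq_true] at h
    have heq : (PySem.List.pyRange 1 (m + 1) 1).countP (fun d => pvCond a d s) =
        (PySem.List.pyRange 1 (m + 1) 1).length := by
      apply List.countP_eq_length.2
      intro d hd
      have hc := h d hd
      simp only [pvCond, Bool.and_eq_true, Bool.or_eq_true] at hc ⊢
      tauto
    omega

theorem speedbreaker_case_eq (n : Int) (a : List Int) :
    speedbreakerCase n a = speedbreakerCaseAlt n a := by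
  unfold speedbreakerCase speedbreakerCaseAlt
  by_cases hLR : (pvLR n a).1 > (pvLR n a).2
  · simp only [hLR, if_true]
  · simp only [hLR, if_false]
    apply PySem.List.foldl_congr_mem
    intro acc s hs
    have hmem := PySem.List.mem_pyRange_one.1 hs
    have h1 := pvLR_fst_ge n a
    have hn := pvLR_snd_le n a
    by_cases hd : min (s - 1) (n - s) > 200
    · simp only [hd, if_true]
    · simp only [hd, if_false]
      rw [count_dict_getD n a (pvLR n a).1 (pvLR n a).2 s]
      have hiff := key_iff n a (pvLR n a).1 (pvLR n a).2 s h1 hn hmem.1 (by omega) (by omega)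
      simp only [ge_iff_le] at hiff ⊢
      rw [if_congr hiff rfl rfl]

-- ===== VERDICT (by name: the statement is the Claim_ definition above) =====
theorem speedbreaker_spec : Claim_equal_speedbreaker := by
  intro tcs _ _
  unfold Spec_speedbreaker speedbreaker speedbreaker_alt
  rw [PySem.List.foldl_append_singleton_eq_map, PySem.List.foldl_append_singleton_eq_map]
  simp only [speedbreaker_case_eq]
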